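-- pv_equiv track=rewrite | github.com/anonymous-borg/Borg | python/borg/perf.py | build_moe_topk_ids
-- ===== SOURCE A (Python) =====
-- def build_moe_topk_ids(
--     num_tokens: int,
--     top_k: int,
--     activated_experts: int,
-- ) -> list[list[int]]:
--     if num_tokens <= 0:
--         raise ValueError("num_tokens must be positive")
--     if top_k <= 0:
--         raise ValueError("top_k must be positive")
--     if activated_experts < top_k:
--         raise ValueError("activated_experts must be at least top_k")
--     if activated_experts > num_tokens * top_k:
--         raise ValueError("activated_experts must not exceed num_tokens * top_k")
--
--     return [
--         [((token_idx * top_k) + offset) % activated_experts for offset in range(top_k)]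
--         for token_idx in range(num_tokens)
--     ]
-- ===== SOURCE B (Python) =====
-- def build_moe_topk_ids(
--     num_tokens: int,
--     top_k: int,
--     activated_experts: int,
-- ) -> list[list[int]]:
--     if num_tokens <= 0:
--         raise ValueError("num_tokens must be positive")
--     if top_k <= 0:
--         raise ValueError("top_k must be positive")
--     if activated_experts < top_k:
--         raise ValueError("activated_experts must be at least top_k")
--     if activated_experts > num_tokens * top_k:
--         raise ValueError("activated_experts must not exceed num_tokens * top_k")
--
--     flat = [i % activated_experts for i in range(num_tokens * top_k)]
--     return [flat[t * top_k:(t + 1) * top_k] for t in range(num_tokens)]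
-- ===== Notes on version B (the rewrite author's own statement) =====
-- stated objective: alternative
-- what changed: Replaces the nested per-token modular comprehension by building one flat list of num_tokens*top_k residues in a single pass and then reshaping it into rows by slicing.
import Mathlib
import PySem

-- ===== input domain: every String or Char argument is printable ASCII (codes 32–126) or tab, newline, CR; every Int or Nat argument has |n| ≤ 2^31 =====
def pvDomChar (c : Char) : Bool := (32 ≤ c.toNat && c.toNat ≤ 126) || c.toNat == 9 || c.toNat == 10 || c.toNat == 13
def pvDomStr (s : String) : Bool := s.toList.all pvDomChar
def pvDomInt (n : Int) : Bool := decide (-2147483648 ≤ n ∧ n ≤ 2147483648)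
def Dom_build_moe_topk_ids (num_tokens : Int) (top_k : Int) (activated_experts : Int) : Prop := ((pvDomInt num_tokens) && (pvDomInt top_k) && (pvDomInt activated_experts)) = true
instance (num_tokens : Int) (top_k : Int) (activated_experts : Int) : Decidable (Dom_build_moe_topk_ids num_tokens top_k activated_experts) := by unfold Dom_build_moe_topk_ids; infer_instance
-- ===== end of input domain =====

-- B builds one flat list of residues in a single pass and reshapes it by slicing
-- (alternative decomposition, same cost); A's guard-raising inputs are excluded by Pre_.

-- ===== PORT A =====
-- nested comprehension: [[(t*k + o) % e for o in range(k)] for t in range(n)]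
def build_moe_topk_ids (num_tokens : Int) (top_k : Int) (activated_experts : Int) : List (List Int) :=
  (PySem.List.pyRange 0 num_tokens 1).map (fun token_idx =>
    (PySem.List.pyRange 0 top_k 1).map (fun offset =>
      PySem.Int.mod (token_idx * top_k + offset) activated_experts))

-- ===== PORT B =====
-- flat single-pass build, then chunk into rows of length top_k by slicing
def build_moe_topk_ids_alt (num_tokens : Int) (top_k : Int) (activated_experts : Int) : List (List Int) :=
  let flat := (PySem.List.pyRange 0 (num_tokens * top_k) 1).map (fun i =>
    PySem.Int.mod i activated_experts)
  (PySem.List.pyRange 0 num_tokens 1).map (fun t =>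
    PySem.List.slice flat (some (t * top_k)) (some ((t + 1) * top_k)))

-- ===== PRECONDITION & SPEC =====
-- Pre_ excludes exactly the inputs on which A raises ValueError in one of its four guards.
def Pre_build_moe_topk_ids (num_tokens : Int) (top_k : Int) (activated_experts : Int) : Prop :=
  0 < num_tokens ∧ 0 < top_k ∧ top_k ≤ activated_experts ∧ activated_experts ≤ num_tokens * top_k
instance (num_tokens : Int) (top_k : Int) (activated_experts : Int) : Decidable (Pre_build_moe_topk_ids num_tokens top_k activated_experts) := by unfold Pre_build_moe_topk_ids; infer_instance

def pvWitness_build_moe_topk_ids : Int × Int × Int := (3, 2, 4)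

def Spec_build_moe_topk_ids (num_tokens : Int) (top_k : Int) (activated_experts : Int) (out : List (List Int)) : Prop := out = build_moe_topk_ids_alt num_tokens top_k activated_experts
instance (num_tokens : Int) (top_k : Int) (activated_experts : Int) (out : List (List Int)) : Decidable (Spec_build_moe_topk_ids num_tokens top_k activated_experts out) := by unfold Spec_build_moe_topk_ids; infer_instance

-- ===== CLAIM (what is proved, stated in full; the proofs are below) =====
def Claim_equal_build_moe_topk_ids : Prop := ∀ (num_tokens : Int) (top_k : Int) (activated_experts : Int), Dom_build_moe_topk_ids num_tokens top_k activated_experts → Pre_build_moe_topk_ids num_tokens top_k activated_experts → Spec_build_moe_topk_ids num_tokens top_k activated_experts (build_moe_topk_ids num_tokens top_k activated_experts)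

-- ===== LEMMAS AND PROOFS =====

-- slicing B's flat residue list at [t*k, (t+1)*k) yields exactly A's row t
lemma row_eq (k e t : Int) (N : Int) (h0 : 0 ≤ t) (hk : 0 < k)
    (hN : (t + 1) * k ≤ N) :
    PySem.List.slice ((PySem.List.pyRange 0 N 1).map (fun i => PySem.Int.mod i e))
        (some (t * k)) (some ((t + 1) * k))
      = (PySem.List.pyRange 0 k 1).map (fun o => PySem.Int.mod (t * k + o) e) := by
  have htk : 0 ≤ t * k := mul_nonneg h0 (le_of_lt hk)
  have htk1 : 0 ≤ (t + 1) * k := mul_nonneg (by omega) (le_of_lt hk)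
  have hsum : t * k + k = (t + 1) * k := by ring
  have ha : (t * k).toNat + k.toNat = ((t + 1) * k).toNat := by omega
  have hle : (t * k).toNat + k.toNat ≤ N.toNat := by omega
  rw [PySem.List.slice_toNat _ htk htk1]
  rw [PySem.List.pyRange_one, PySem.List.pyRange_one]
  simp only [sub_zero, List.map_map]
  apply List.ext_getElem
  · simp only [List.length_map, List.length_take, List.length_drop, List.length_range]
    omega
  · intro i h1 h2
    simp only [List.getElem_map, List.getElem_take, List.getElem_drop, List.getElem_range,
      Function.comp]
    congr 1
    have hcast : ((t * k).toNat : Int) = t * k := Int.toNat_of_nonneg htk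
    push_cast
    omega

-- ===== VERDICT (by name: the statement is the Claim_ definition above) =====
theorem build_moe_topk_ids_spec : Claim_equal_build_moe_topk_ids := by
  intro n k e _ hpre
  obtain ⟨hn, hk, _, _⟩ := hpre
  unfold Spec_build_moe_topk_ids build_moe_topk_ids build_moe_topk_ids_alt
  apply List.map_congr_left
  intro t ht
  rw [PySem.List.mem_pyRange_one] at ht
  exact (row_eq k e t (n * k) ht.1 hk
    (mul_le_mul_of_nonneg_right (by omega) (le_of_lt hk))).symm
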